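-- pv_equiv track=rewrite | github.com/eea/eea.api.dataconnector | eea/api/dataconnector/api/dataconnector.py | _build_table_from_fields
-- ===== SOURCE A (Python) =====
-- def _build_table_from_fields(items, fields):
--     """
--     Build a table from fields.
--
--     Args:
--     - items: The items to process.
--     - fields: The fields to include in the table.
--
--     Returns:
--     A dictionary containing the table data.
--     """
--     table = {}
--     for field_obj in fields:
--         field_name = field_obj.get("field")
--         table[field_name] = [
--             item.get("_source", {}).get(field_name) for item in items
--         ]
--     return table
-- ===== SOURCE B (Python) =====
-- def _build_table_from_fields(items, fields):
--     names = list(dict.fromkeys(f.get("field") for f in fields))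
--     table = {name: [] for name in names}
--     for item in items:
--         source = item.get("_source", {})
--         for name in names:
--             table[name].append(source.get(name))
--     return table
-- ===== Notes on version B (the rewrite author's own statement) =====
-- stated objective: alternative
-- what changed: B first collects the ordered distinct field names, then makes one pass over items, extending all columns in parallel, instead of A's one full scan of items per field with dict overwrite handling duplicates.
-- outside the precondition, e.g. on _build_table_from_fields([{'_source': {'a': 'x'}}], [{'f': 'a'}]): A returns {None: [None]}, B returns {None: [None]}
import Mathlib
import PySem

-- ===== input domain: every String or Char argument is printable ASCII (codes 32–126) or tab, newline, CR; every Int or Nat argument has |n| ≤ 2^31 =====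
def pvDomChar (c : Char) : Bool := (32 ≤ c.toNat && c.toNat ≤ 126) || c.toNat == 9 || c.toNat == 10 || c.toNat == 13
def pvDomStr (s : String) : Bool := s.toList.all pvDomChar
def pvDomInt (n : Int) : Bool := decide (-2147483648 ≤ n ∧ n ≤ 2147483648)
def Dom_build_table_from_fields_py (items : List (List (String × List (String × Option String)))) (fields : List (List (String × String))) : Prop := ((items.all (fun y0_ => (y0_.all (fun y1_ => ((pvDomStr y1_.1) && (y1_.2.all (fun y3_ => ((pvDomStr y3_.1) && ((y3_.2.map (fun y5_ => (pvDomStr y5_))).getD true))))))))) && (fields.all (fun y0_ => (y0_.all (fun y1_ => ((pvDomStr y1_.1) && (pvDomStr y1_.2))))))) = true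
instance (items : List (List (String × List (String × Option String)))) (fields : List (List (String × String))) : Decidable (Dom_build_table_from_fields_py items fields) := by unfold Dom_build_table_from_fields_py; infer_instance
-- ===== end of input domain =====

-- B builds the table in one pass over items, extending all (de-duplicated) columns in parallel,
-- instead of A's full scan of items once per field; the return value is proved equal on Pre_.

-- ===== PORT A =====
def build_table_from_fields_py (items : List (List (String × List (String × Option String)))) (fields : List (List (String × String))) : List (String × List (Option String)) :=
  (fields.foldl
    (fun (table : PySem.Dict String (List (Option String))) field_obj =>
      let field_name := ((PySem.Dict.mk field_obj).get? "field").getD ""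
      table.insert field_name
        (items.map (fun item =>
          ((PySem.Dict.mk (((PySem.Dict.mk item).get? "_source").getD [])).get? field_name).join)))
    PySem.Dict.empty).items

-- ===== PORT B =====
def build_table_from_fields_py_alt (items : List (List (String × List (String × Option String)))) (fields : List (List (String × String))) : List (String × List (Option String)) :=
  let names := PySem.List.dedup (fields.map (fun f => ((PySem.Dict.mk f).get? "field").getD ""))
  let table0 := names.foldl (fun (d : PySem.Dict String (List (Option String))) n => d.insert n []) PySem.Dict.empty
  (items.foldl
    (fun table item =>
      let source := ((PySem.Dict.mk item).get? "_source").getD []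
      names.foldl
        (fun t n => t.modify n [] (fun col => col ++ [((PySem.Dict.mk source).get? n).join]))
        table)
    table0).items

-- ===== PRECONDITION & SPEC =====
-- Pre_ excludes inputs where some field dict lacks the key "field": there Python's A returns a
-- dict keyed by None, which is not a value of the declared type dict[str, list].
def Pre_build_table_from_fields_py (items : List (List (String × List (String × Option String)))) (fields : List (List (String × String))) : Prop :=
  ∀ f ∈ fields, (PySem.Dict.mk f).contains "field" = true

instance (items : List (List (String × List (String × Option String)))) (fields : List (List (String × String))) : Decidable (Pre_build_table_from_fields_py items fields) := by unfold Pre_build_table_from_fields_py; infer_instance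

def pvWitness_build_table_from_fields_py : (List (List (String × List (String × Option String)))) × (List (List (String × String))) :=
  ([[("_source", [("a", some "x"), ("b", none)])], [("_source", [("b", some "y")])]],
   [[("field", "a")], [("field", "b")], [("field", "a")]])

def Spec_build_table_from_fields_py (items : List (List (String × List (String × Option String)))) (fields : List (List (String × String))) (out : List (String × List (Option String))) : Prop := out = build_table_from_fields_py_alt items fields
instance (items : List (List (String × List (String × Option String)))) (fields : List (List (String × String))) (out : List (String × List (Option String))) : Decidable (Spec_build_table_from_fields_py items fields out) := by unfold Spec_build_table_from_fields_py; infer_instance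

-- ===== CLAIM (what is proved, stated in full; the proofs are below) =====
def Claim_equal_build_table_from_fields_py : Prop := ∀ (items : List (List (String × List (String × Option String)))) (fields : List (List (String × String))), Dom_build_table_from_fields_py items fields → Pre_build_table_from_fields_py items fields → Spec_build_table_from_fields_py items fields (build_table_from_fields_py items fields)

-- ===== LEMMAS AND PROOFS =====

-- getD after a fold that inserts, at each key j of N, a value depending only on j
lemma getD_foldl_insert_fun {ν : Type} (v : String → ν) (dflt : ν) :
    ∀ (N : List String) (d : PySem.Dict String ν) (k : String),
      (N.foldl (fun t j => t.insert j (v j)) d).getD k dflt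
        = if k ∈ N then v k else d.getD k dflt := by
  intro N
  induction N with
  | nil => intro d k; simp
  | cons x N ih =>
    intro d k
    simp only [List.foldl_cons, ih]
    by_cases hN : k ∈ N
    · simp [hN]
    · by_cases hx : k = x
      · subst hx; simp [hN, PySem.Dict.getD_insert_self]
      · simp [hN, hx, PySem.Dict.getD_insert_of_ne d (v x) dflt hx]

-- getD after B's inner fold over the name list
lemma getD_inner_fold (g : String → Option String) :
    ∀ (N : List String) (t : PySem.Dict String (List (Option String))) (k : String),
      (N.foldl (fun t n => t.modify n [] (fun col => col ++ [g n])) t).getD k []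
        = t.getD k [] ++ List.replicate (N.count k) (g k) := by
  intro N
  induction N with
  | nil => intro t k; simp
  | cons x N ih =>
    intro t k
    simp only [List.foldl_cons, ih]
    by_cases hx : k = x
    · subst hx
      rw [PySem.Dict.getD_modify_self, List.count_cons_self, List.replicate_succ,
        List.append_assoc]
      simp
    · rw [PySem.Dict.getD_modify_of_ne _ _ _ hx]
      simp [Ne.symm hx]

-- keys are preserved by B's inner fold when every name is already a key
lemma keys_inner_fold (g : String → Option String)
    (N : List String) (t : PySem.Dict String (List (Option String)))
    (h : ∀ n ∈ N, n ∈ t.keys) :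
    (N.foldl (fun t n => t.modify n [] (fun col => col ++ [g n])) t).keys = t.keys := by
  rw [PySem.Dict.keys_foldl_modify, PySem.Set.update_eq_append_filter]
  have : (PySem.Set.ofList N).filter (fun y => !(PySem.Set.contains t.keys y)) = [] := by
    rw [List.filter_eq_nil_iff]
    intro a ha
    have : a ∈ t.keys := h a ((PySem.List.mem_dedup N a).mp (by simpa using ha))
    simp [this]
  rw [this, List.append_nil]

-- B's outer fold over items: keys stay `names`, and each column collects one entry per item
lemma outer_fold_spec {I : Type} (G : I → String → Option String) (names : List String)
    (hnd : names.Nodup) :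
    ∀ (items : List I) (t : PySem.Dict String (List (Option String))), t.keys = names →
      ((items.foldl (fun table it =>
          names.foldl (fun t n => t.modify n [] (fun col => col ++ [G it n])) table) t).keys = names
      ∧ ∀ k ∈ names,
        (items.foldl (fun table it =>
          names.foldl (fun t n => t.modify n [] (fun col => col ++ [G it n])) table) t).getD k []
          = t.getD k [] ++ items.map (fun it => G it k)) := by
  intro items
  induction items with
  | nil => intro t ht; exact ⟨ht, fun k _ => by simp⟩
  | cons it items ih =>
    intro t ht
    simp only [List.foldl_cons]
    have hk' : (names.foldl (fun t n => t.modify n [] (fun col => col ++ [G it n])) t).keys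
        = names := by
      rw [keys_inner_fold]; exact ht
      intro n hn; rw [ht]; exact hn
    obtain ⟨h1, h2⟩ := ih _ hk'
    refine ⟨h1, fun k hk => ?_⟩
    rw [h2 k hk, getD_inner_fold, List.count_eq_one_of_mem hnd hk]
    simp

-- the common shape of both ports, fully abstracted
lemma main_general {F I : Type} (nm : F → String) (G : I → String → Option String)
    (items : List I) (fields : List F) :
    (fields.foldl
        (fun (t : PySem.Dict String (List (Option String))) fo =>
          t.insert (nm fo) (items.map (fun it => G it (nm fo)))) PySem.Dict.empty).items
    = ((items.foldl
        (fun table it =>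
          (PySem.List.dedup (fields.map nm)).foldl
            (fun t n => t.modify n [] (fun col => col ++ [G it n])) table)
        ((PySem.List.dedup (fields.map nm)).foldl
          (fun (d : PySem.Dict String (List (Option String))) n => d.insert n [])
          PySem.Dict.empty))).items := by
  have hnd : (PySem.List.dedup (fields.map nm)).Nodup := PySem.List.nodup_dedup _
  -- A side
  have hA : (fields.map nm).foldl
      (fun (t : PySem.Dict String (List (Option String))) j =>
        t.insert j (items.map (fun it => G it j))) PySem.Dict.empty
      = fields.foldl
        (fun t fo => t.insert (nm fo) (items.map (fun it => G it (nm fo)))) PySem.Dict.empty := by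
    rw [List.foldl_map]
  have hkA : ((fields.map nm).foldl
      (fun (t : PySem.Dict String (List (Option String))) j =>
        t.insert j (items.map (fun it => G it j))) PySem.Dict.empty).keys
      = PySem.List.dedup (fields.map nm) := by
    rw [PySem.Dict.keys_foldl_insert]
    simp [PySem.Set.update_nil_left, PySem.List.dedup_eq_ofList]
  -- B side: keys of the initial table
  have hk0 : ((PySem.List.dedup (fields.map nm)).foldl
      (fun (d : PySem.Dict String (List (Option String))) n => d.insert n [])
      PySem.Dict.empty).keys = PySem.List.dedup (fields.map nm) := by
    rw [PySem.Dict.keys_foldl_insert]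
    simp [PySem.Set.update_nil_left, PySem.List.dedup_eq_ofList,
      PySem.List.dedup_eq_ofList, PySem.Set.ofList_ofList]
  obtain ⟨hkB, hgB⟩ := outer_fold_spec G (PySem.List.dedup (fields.map nm)) hnd items _ hk0
  rw [← hA]
  have hndA : ((fields.map nm).foldl
      (fun (t : PySem.Dict String (List (Option String))) j =>
        t.insert j (items.map (fun it => G it j))) PySem.Dict.empty).keys.Nodup := by
    rw [hkA]; exact hnd
  have hndB : ((items.foldl
      (fun table it =>
        (PySem.List.dedup (fields.map nm)).foldl
          (fun t n => t.modify n [] (fun col => col ++ [G it n])) table)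
      ((PySem.List.dedup (fields.map nm)).foldl
        (fun (d : PySem.Dict String (List (Option String))) n => d.insert n [])
        PySem.Dict.empty))).keys.Nodup := by
    rw [hkB]; exact hnd
  rw [PySem.Dict.items_eq_map_keys _ hndA [], PySem.Dict.items_eq_map_keys _ hndB []]
  rw [hkA, hkB]
  apply List.map_congr_left
  intro k hk
  have hAk : ((fields.map nm).foldl
      (fun (t : PySem.Dict String (List (Option String))) j =>
        t.insert j (items.map (fun it => G it j))) PySem.Dict.empty).getD k []
      = items.map (fun it => G it k) := by
    rw [getD_foldl_insert_fun]
    simp [(PySem.List.mem_dedup _ _).mp hk]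
  have h0k : ((PySem.List.dedup (fields.map nm)).foldl
      (fun (d : PySem.Dict String (List (Option String))) n => d.insert n [])
      PySem.Dict.empty).getD k [] = [] := by
    rw [getD_foldl_insert_fun (fun _ => ([] : List (Option String)))]
    split <;> simp
  rw [hAk, hgB k hk, h0k, List.nil_append]

-- ===== VERDICT (by name: the statement is the Claim_ definition above) =====
theorem build_table_from_fields_py_spec : Claim_equal_build_table_from_fields_py := by
  intro items fields _ _
  show build_table_from_fields_py items fields = build_table_from_fields_py_alt items fields
  exact main_general
    (fun f => ((PySem.Dict.mk f).get? "field").getD "")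
    (fun item n => ((PySem.Dict.mk (((PySem.Dict.mk item).get? "_source").getD [])).get? n).join)
    items fields
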